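-- pv_equiv track=rewrite | github.com/summerfang/study | nbox/NBoxes.py | box_combination
-- ===== SOURCE A (Python) =====
-- def box_combination(n):
--     if not isinstance(n, int) or n <= 0:
--         raise ValueError("n has to be positive integer")
--
--     qualified_combination = list()
--
--     for i in range(1, n + 1):
--         y = 1
--
--         while i * y < n:
--             y = y + 1
--
--         item = list()
--         item.append(i)
--         item.append(y)
--
--         qualified_combination.append(item)
--
--     return qualified_combination
-- ===== SOURCE B (Python) =====
-- def box_combination(n):
--     if not isinstance(n, int) or n <= 0:
--         raise ValueError("n has to be positive integer")
--     return [[i, -(-n // i)] for i in range(1, n + 1)]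
-- ===== Notes on version B (the rewrite author's own statement) =====
-- stated objective: faster
-- what changed: replaces the inner while-loop search for the smallest y with i*y>=n by direct ceiling division -(-n//i) in a single comprehension
import Mathlib
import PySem

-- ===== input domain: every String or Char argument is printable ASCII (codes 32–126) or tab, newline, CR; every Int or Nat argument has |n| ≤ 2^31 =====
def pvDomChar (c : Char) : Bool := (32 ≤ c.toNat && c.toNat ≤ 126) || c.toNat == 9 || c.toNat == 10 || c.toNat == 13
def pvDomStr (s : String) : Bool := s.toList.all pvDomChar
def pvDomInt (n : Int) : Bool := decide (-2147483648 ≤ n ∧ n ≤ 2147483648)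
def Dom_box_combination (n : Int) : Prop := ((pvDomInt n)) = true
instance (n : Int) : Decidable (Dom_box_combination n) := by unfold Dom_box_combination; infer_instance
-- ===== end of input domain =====

-- B replaces A's inner while-loop search for the smallest y with i*y >= n by ceiling division (objective: faster).

-- ===== PORT A =====
-- the 'while i * y < n: y = y + 1' loop; fuel is a totality guard only (n.toNat steps
-- always suffice inside Pre_, where 1 ≤ i and 1 ≤ n)
def pvWhileY (fuel : Nat) (i n y : Int) : Int :=
  match fuel with
  | 0 => y
  | f + 1 => if i * y < n then pvWhileY f i n (y + 1) else y

-- the 'for i in range(1, n+1)' loop appending one item per i, as structural recursion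
def pvLoopA (n : Int) : List Int → List (List Int)
  | [] => []
  | i :: rest => [i, pvWhileY n.toNat i n 1] :: pvLoopA n rest

def box_combination (n : Int) : List (List Int) :=
  pvLoopA n (PySem.List.pyRange 1 (n + 1) 1)

-- ===== PORT B =====
def box_combination_alt (n : Int) : List (List Int) :=
  (PySem.List.pyRange 1 (n + 1) 1).map (fun i => [i, -(PySem.Int.floordiv (-n) i)])

-- ===== PRECONDITION & SPEC =====
-- Python A raises ValueError for n <= 0; those inputs are excluded.
def Pre_box_combination (n : Int) : Prop := 0 < n
instance (n : Int) : Decidable (Pre_box_combination n) := by unfold Pre_box_combination; infer_instance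
def pvWitness_box_combination : Int := 7
def Spec_box_combination (n : Int) (out : List (List Int)) : Prop := out = box_combination_alt n
instance (n : Int) (out : List (List Int)) : Decidable (Spec_box_combination n out) := by unfold Spec_box_combination; infer_instance

-- ===== CLAIM (what is proved, stated in full; the proofs are below) =====
def Claim_equal_box_combination : Prop := ∀ (n : Int), Dom_box_combination n → Pre_box_combination n → Spec_box_combination n (box_combination n)

-- ===== LEMMAS AND PROOFS =====

theorem pvCeil_bounds {n i : Int} (hi : 0 < i) :
    (-(PySem.Int.floordiv (-n) i) - 1) * i < n ∧ n ≤ -(PySem.Int.floordiv (-n) i) * i :=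
  (PySem.Int.neg_floordiv_neg_eq_iff_of_pos hi).mp rfl

theorem pvWhileY_eq (fuel : Nat) (i n y : Int) (hi : 0 < i)
    (hy : y ≤ -(PySem.Int.floordiv (-n) i))
    (hf : (-(PySem.Int.floordiv (-n) i) - y).toNat ≤ fuel) :
    pvWhileY fuel i n y = -(PySem.Int.floordiv (-n) i) := by
  induction fuel generalizing y with
  | zero =>
    have h := pvCeil_bounds (n := n) hi
    have : y = -(PySem.Int.floordiv (-n) i) := by omega
    subst this
    simp [pvWhileY]
  | succ f ih =>
    have h := pvCeil_bounds (n := n) hi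
    set c := -(PySem.Int.floordiv (-n) i) with hc
    by_cases hlt : i * y < n
    · have hyc : y < c := by
        by_contra hge
        have : y = c := by omega
        nlinarith [h.2]
      rw [pvWhileY, if_pos hlt]
      exact ih (y + 1) (by omega) (by omega)
    · have : ¬ y < c := by
        intro hyc
        have : i * y ≤ i * (c - 1) := by nlinarith
        nlinarith [h.1]
      have : y = c := by omega
      rw [pvWhileY, if_neg hlt, this]

theorem pvLoopA_eq_map (n : Int) (l : List Int) :
    pvLoopA n l = l.map (fun i => [i, pvWhileY n.toNat i n 1]) := by
  induction l with
  | nil => rfl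
  | cons x xs ih => simp [pvLoopA, ih]

-- ===== VERDICT (by name: the statement is the Claim_ definition above) =====
theorem box_combination_spec : Claim_equal_box_combination := by
  intro n _ hn
  unfold Spec_box_combination box_combination box_combination_alt
  rw [pvLoopA_eq_map]
  apply List.map_congr_left
  intro i hi
  rw [PySem.List.mem_pyRange_one] at hi
  have hi0 : 0 < i := by omega
  have h := pvCeil_bounds (n := n) hi0
  set c := -(PySem.Int.floordiv (-n) i) with hc
  have hc1 : 1 ≤ c := by nlinarith [h.2]
  have hcn : c ≤ n := by nlinarith [h.1]
  rw [pvWhileY_eq n.toNat i n 1 hi0 hc1 (by omega)]
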